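-- pv_equiv track=rewrite | github.com/1tav0/TranslatingDsa | Python/Problem6.py | nearestCell
-- ===== SOURCE A (Python) =====
-- from collections import deque
--
-- def nearestCell(grid):
--     n, m = len(grid), len(grid[0])
--     vis = [[0] * m for _ in range(n)]
--     ans = [[0] * m for _ in range(n)]
--     # queue to store the cell indexes which have grid value 1.
--     q = deque()
--     for i in range(n):
--         for j in range(m):
--             if grid[i][j] == 1:
--                 q.append([i, j, 0])
--                 vis[i][j] = 1
--     delrow = [-1, 0, 1, 0]
--     delcol = [0, -1, 0, 1]
--     while len(q):
--         front = q.popleft()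
--         row = front[0]
--         col = front[1]
--         steps = front[2]
--
--         ans[row][col] = steps
--         for i in range(4):
--             newr = delrow[i] + row
--             newc = delcol[i] + col
--             if 0 <= newr < n and 0 <= newc < m and not vis[newr][newc]:
--                 vis[newr][newc] = 1
--                 q.append([newr, newc, steps + 1])
--     return ans
-- ===== SOURCE B (Python) =====
-- def nearestCell(grid):
--     n, m = len(grid), len(grid[0])
--     srcs = [(i, j) for i in range(n) for j in range(m) if grid[i][j] == 1]
--     if not srcs:
--         return [[0] * m for _ in range(n)]
--     return [[min(abs(i - si) + abs(j - sj) for si, sj in srcs)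
--              for j in range(m)] for i in range(n)]
-- ===== Notes on version B (the rewrite author's own statement) =====
-- stated objective: alternative
-- what changed: replaces the multi-source BFS (deque, visited matrix, neighbour expansion) by a closed form: in an obstacle-free grid the BFS distance to the nearest 1-cell equals the minimum Manhattan distance over the 1-cells, so B collects the 1-cells once and computes each entry as a per-cell minimum (all-zeros grid when there are no 1-cells)
import Mathlib
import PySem

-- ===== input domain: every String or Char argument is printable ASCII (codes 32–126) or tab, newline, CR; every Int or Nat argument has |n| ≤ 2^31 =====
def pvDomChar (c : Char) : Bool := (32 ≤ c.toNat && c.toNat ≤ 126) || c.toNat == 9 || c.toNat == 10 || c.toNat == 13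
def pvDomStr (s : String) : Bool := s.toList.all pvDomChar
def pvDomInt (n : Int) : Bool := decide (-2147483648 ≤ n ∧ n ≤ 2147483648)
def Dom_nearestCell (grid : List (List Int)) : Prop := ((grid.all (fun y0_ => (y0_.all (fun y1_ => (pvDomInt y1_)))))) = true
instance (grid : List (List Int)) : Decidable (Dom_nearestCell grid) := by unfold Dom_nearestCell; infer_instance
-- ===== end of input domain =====

-- B replaces A's multi-source BFS by a closed form: in this obstacle-free grid the BFS
-- distance to the nearest 1-cell equals the minimum Manhattan distance over the 1-cells,
-- so B collects the 1-cells once and takes a per-cell minimum (all zeros when there are none).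
-- Neither version mutates its argument.

-- ===== PORT A =====
-- helpers: read/write of a cell of a list-of-lists grid.
-- Python indices here are always ≥ 0 (sources come from range, neighbours are guarded by 0 <=),
-- so .toNat is exact on every reachable access.
def gridGet (g : List (List Int)) (r c : Int) : Int := (g.getD r.toNat []).getD c.toNat 0
-- read of vis[r][c]; default 1 is never hit on real states (vis is n×m and accesses are
-- guarded in bounds); it only makes out-of-structure reads count as visited, for termination.
def visGet (g : List (List Int)) (r c : Int) : Int := (g.getD r.toNat []).getD c.toNat 1
-- g[r][c] = v  (out-of-structure writes are identity; never hit on real states)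
def setCell (g : List (List Int)) (r c v : Int) : List (List Int) :=
  g.set r.toNat ((g.getD r.toNat []).set c.toNat v)
-- termination measure ingredient: number of 0 entries
def zerosIn (g : List (List Int)) : Nat := (g.map (fun row => row.count 0)).sum

-- body of A's `for i in range(4)` loop: state (queue, vis)
def stepA (nn mm row col steps : Int) (st : List (Int × Int × Int) × List (List Int)) (i : Nat) :
    List (Int × Int × Int) × List (List Int) :=
  if 0 ≤ ([-1, 0, 1, 0] : List Int).getD i 0 + row ∧ ([-1, 0, 1, 0] : List Int).getD i 0 + row < nn ∧
      0 ≤ ([0, -1, 0, 1] : List Int).getD i 0 + col ∧ ([0, -1, 0, 1] : List Int).getD i 0 + col < mm ∧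
      visGet st.2 (([-1, 0, 1, 0] : List Int).getD i 0 + row) (([0, -1, 0, 1] : List Int).getD i 0 + col) = 0 then
    (st.1 ++ [(([-1, 0, 1, 0] : List Int).getD i 0 + row, ([0, -1, 0, 1] : List Int).getD i 0 + col, steps + 1)],
      setCell st.2 (([-1, 0, 1, 0] : List Int).getD i 0 + row) (([0, -1, 0, 1] : List Int).getD i 0 + col) 1)
  else st

lemma count_set_zero (row : List Int) (c : Nat) (hc : c < row.length) (h0 : row.getD c 1 = 0) :
    (row.set c 1).count 0 + 1 = row.count 0 := by
  induction row generalizing c with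
  | nil => simp at hc
  | cons a l ih =>
    cases c with
    | zero =>
      simp [List.getD] at h0
      subst h0
      simp
    | succ c =>
      simp only [List.length_cons, Nat.succ_lt_succ_iff] at hc
      simp only [List.getD_cons_succ] at h0
      have := ih c hc h0
      simp only [List.set_cons_succ, List.count_cons]
      omega

lemma visGet_zero_bounds (vis : List (List Int)) (r c : Int) (h : visGet vis r c = 0) :
    r.toNat < vis.length ∧ c.toNat < (vis.getD r.toNat []).length ∧
      (vis.getD r.toNat []).getD c.toNat 1 = 0 := by
  unfold visGet at h
  by_cases hr : r.toNat < vis.length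
  · by_cases hc : c.toNat < (vis.getD r.toNat []).length
    · exact ⟨hr, hc, h⟩
    · rw [List.getD_eq_default _ _ (Nat.le_of_not_lt hc)] at h; exact absurd h (by norm_num)
  · rw [List.getD_eq_default _ _ (Nat.le_of_not_lt hr)] at h
    simp [List.getD] at h

lemma zerosIn_set (vis : List (List Int)) (r : Nat) (row' : List Int) (hr : r < vis.length) :
    zerosIn (vis.set r row') + (vis.getD r []).count 0 = zerosIn vis + row'.count 0 := by
  induction vis generalizing r with
  | nil => simp at hr
  | cons a l ih =>
    cases r with
    | zero => simp [zerosIn, List.getD]; omega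
    | succ r =>
      simp only [List.length_cons, Nat.succ_lt_succ_iff] at hr
      have := ih r hr
      simp [zerosIn, List.getD] at this ⊢
      omega

lemma zerosIn_setCell (vis : List (List Int)) (r c : Int) (h : visGet vis r c = 0) :
    zerosIn (setCell vis r c 1) + 1 = zerosIn vis := by
  obtain ⟨hr, hc, h0⟩ := visGet_zero_bounds vis r c h
  have hcnt : ((vis.getD r.toNat []).set c.toNat 1).count 0 + 1 = (vis.getD r.toNat []).count 0 := by
    exact count_set_zero _ _ hc h0
  have := zerosIn_set vis r.toNat ((vis.getD r.toNat []).set c.toNat 1) hr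
  unfold setCell
  omega

lemma stepA_bound (nn mm row col steps : Int) (st : List (Int × Int × Int) × List (List Int)) (i : Nat) :
    zerosIn (stepA nn mm row col steps st i).2 + (stepA nn mm row col steps st i).1.length ≤
        zerosIn st.2 + st.1.length ∧
      zerosIn (stepA nn mm row col steps st i).2 ≤ zerosIn st.2 := by
  unfold stepA
  split
  · rename_i hcond
    have := zerosIn_setCell st.2 _ _ hcond.2.2.2.2
    simp at this ⊢
    omega
  · omega

lemma foldA_bound (nn mm row col steps : Int) (l : List Nat) (st : List (Int × Int × Int) × List (List Int)) :
    zerosIn (l.foldl (stepA nn mm row col steps) st).2 + (l.foldl (stepA nn mm row col steps) st).1.length ≤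
        zerosIn st.2 + st.1.length ∧
      zerosIn (l.foldl (stepA nn mm row col steps) st).2 ≤ zerosIn st.2 := by
  induction l generalizing st with
  | nil => simp
  | cons a l ih =>
    have h1 := stepA_bound nn mm row col steps st a
    have h2 := ih (stepA nn mm row col steps st a)
    simp only [List.foldl_cons]
    omega

-- A's while loop
def loopA (nn mm : Int) (q : List (Int × Int × Int)) (vis ans : List (List Int)) : List (List Int) :=
  match q with
  | [] => ans
  | (row, col, steps) :: rest =>
    let ans' := setCell ans row col steps
    let st := (List.range 4).foldl (stepA nn mm row col steps) (rest, vis)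
    loopA nn mm st.1 st.2 ans'
termination_by 2 * zerosIn vis + q.length
decreasing_by
  have h := foldA_bound nn mm row col steps (List.range 4) (rest, vis)
  simp at h ⊢
  omega

def nearestCell (grid : List (List Int)) : List (List Int) :=
  let n := grid.length
  let m := (grid.headD []).length
  let vis0 := (List.range n).map (fun _ => List.replicate m (0 : Int))
  let ans0 := (List.range n).map (fun _ => List.replicate m (0 : Int))
  let init := (List.range n).foldl
    (fun (st : List (Int × Int × Int) × List (List Int)) (i : Nat) =>
      (List.range m).foldl
        (fun (st : List (Int × Int × Int) × List (List Int)) (j : Nat) =>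
          if gridGet grid (i : Int) (j : Int) = 1 then
            (st.1 ++ [((i : Int), (j : Int), (0 : Int))], setCell st.2 (i : Int) (j : Int) 1)
          else st) st) ([], vis0)
  loopA n m init.1 init.2 ans0

-- ===== PORT B =====
-- Manhattan distance |i - si| + |j - sj| (the expression inside Source B's min)
def manh (p q : Int × Int) : Int := |p.1 - q.1| + |p.2 - q.2|

-- the list comprehension collecting the 1-cells, row-major
def srcList (grid : List (List Int)) (n m : Nat) : List (Int × Int) :=
  (List.range n).flatMap (fun (i : Nat) =>
    ((List.range m).filter (fun (j : Nat) => gridGet grid (i : Int) (j : Int) = 1)).map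
      (fun (j : Nat) => ((i : Int), (j : Int))))

def nearestCell_alt (grid : List (List Int)) : List (List Int) :=
  let n := grid.length
  let m := (grid.headD []).length
  let srcs := srcList grid n m
  if srcs = [] then (List.range n).map (fun _ => List.replicate m (0 : Int))
  else (List.range n).map (fun (i : Nat) => (List.range m).map (fun (j : Nat) =>
    ((srcs.map (manh ((i : Int), (j : Int)))).min?).getD 0))

-- ===== PRECONDITION & SPEC =====
-- Pre_ excludes exactly the inputs where the Python raises: an empty grid (grid[0] → IndexError)
-- and grids with a row shorter than row 0 (grid[i][j] → IndexError); nothing else.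
def Pre_nearestCell (grid : List (List Int)) : Prop :=
  grid ≠ [] ∧ ∀ row ∈ grid, (grid.headD []).length ≤ row.length
instance (grid : List (List Int)) : Decidable (Pre_nearestCell grid) := by
  unfold Pre_nearestCell; infer_instance

def pvWitness_nearestCell : List (List Int) := [[0, 1, 0], [0, 0, 0]]

def Spec_nearestCell (grid : List (List Int)) (out : List (List Int)) : Prop := out = nearestCell_alt grid
instance (grid : List (List Int)) (out : List (List Int)) : Decidable (Spec_nearestCell grid out) := by unfold Spec_nearestCell; infer_instance

-- ===== CLAIM (what is proved, stated in full; the proofs are below) =====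
def Claim_equal_nearestCell : Prop := ∀ (grid : List (List Int)), Dom_nearestCell grid → Pre_nearestCell grid → Spec_nearestCell grid (nearestCell grid)

-- ===== LEMMAS AND PROOFS =====

-- ---------- level-synchronous reformulation of A's BFS (proof-side only) ----------

-- neighbour step: state (nxt, vis, ans)
def stepB (nn mm : Int) (st : List (Int × Int) × List (List Int) × List (List Int)) (p : Int × Int) :
    List (Int × Int) × List (List Int) × List (List Int) :=
  if 0 ≤ p.1 ∧ p.1 < nn ∧ 0 ≤ p.2 ∧ p.2 < mm ∧ visGet st.2.1 p.1 p.2 = 0 then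
    (st.1 ++ [p], setCell st.2.1 p.1 p.2 1, st.2.2)
  else st

-- one frontier cell: write its level into ans, then expand its four neighbours
def cellB (nn mm lvl : Int) (st : List (Int × Int) × List (List Int) × List (List Int)) (rc : Int × Int) :
    List (Int × Int) × List (List Int) × List (List Int) :=
  [(rc.1 - 1, rc.2), (rc.1, rc.2 - 1), (rc.1 + 1, rc.2), (rc.1, rc.2 + 1)].foldl (stepB nn mm)
    (st.1, st.2.1, setCell st.2.2 rc.1 rc.2 lvl)

lemma stepB_bound (nn mm : Int) (st : List (Int × Int) × List (List Int) × List (List Int)) (p : Int × Int) :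
    zerosIn (stepB nn mm st p).2.1 + (stepB nn mm st p).1.length ≤ zerosIn st.2.1 + st.1.length ∧
      zerosIn (stepB nn mm st p).2.1 ≤ zerosIn st.2.1 := by
  unfold stepB
  split
  · rename_i hcond
    have := zerosIn_setCell st.2.1 _ _ hcond.2.2.2.2
    simp at this ⊢
    omega
  · omega

lemma cellB_bound (nn mm _lvl : Int) (l : List (Int × Int)) (st : List (Int × Int) × List (List Int) × List (List Int)) :
    zerosIn (l.foldl (stepB nn mm) st).2.1 + (l.foldl (stepB nn mm) st).1.length ≤
        zerosIn st.2.1 + st.1.length ∧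
      zerosIn (l.foldl (stepB nn mm) st).2.1 ≤ zerosIn st.2.1 := by
  induction l generalizing st with
  | nil => simp
  | cons a l ih =>
    have h1 := stepB_bound nn mm st a
    have h2 := ih (stepB nn mm st a)
    simp only [List.foldl_cons]
    omega

lemma foldB_bound (nn mm lvl : Int) (l : List (Int × Int)) (st : List (Int × Int) × List (List Int) × List (List Int)) :
    zerosIn (l.foldl (cellB nn mm lvl) st).2.1 + (l.foldl (cellB nn mm lvl) st).1.length ≤
        zerosIn st.2.1 + st.1.length ∧
      zerosIn (l.foldl (cellB nn mm lvl) st).2.1 ≤ zerosIn st.2.1 := by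
  induction l generalizing st with
  | nil => simp
  | cons a l ih =>
    have h1 := cellB_bound nn mm lvl [(a.1 - 1, a.2), (a.1, a.2 - 1), (a.1 + 1, a.2), (a.1, a.2 + 1)]
      (st.1, st.2.1, setCell st.2.2 a.1 a.2 lvl)
    have h2 := ih (cellB nn mm lvl st a)
    simp only [List.foldl_cons]
    unfold cellB at h2 ⊢
    simp at h1 h2 ⊢
    omega

-- level-synchronous loop
def loopB (nn mm : Int) (frontier : List (Int × Int)) (lvl : Int) (vis ans : List (List Int)) :
    List (List Int) :=
  match frontier with
  | [] => ans
  | _ :: _ =>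
    let st := frontier.foldl (cellB nn mm lvl) ([], vis, ans)
    loopB nn mm st.1 (lvl + 1) st.2.1 st.2.2
termination_by 2 * zerosIn vis + frontier.length
decreasing_by
  have h := foldB_bound nn mm lvl frontier ([], vis, ans)
  simp only [List.foldl_attach, List.length_cons]
  simp at h
  omega

-- (p.1, p.2, k) : the queue entry A stores for a frontier cell of level k
def triAt (k : Int) (p : Int × Int) : Int × Int × Int := (p.1, p.2, k)

-- the four neighbours, in A's direction order: up, left, down, right
def nbrs (p : Int × Int) : List (Int × Int) := [(p.1 - 1, p.2), (p.1, p.2 - 1), (p.1 + 1, p.2), (p.1, p.2 + 1)]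

-- the common core of one cell expansion: which neighbours get enqueued, and the updated vis
def nrun (nn mm : Int) (vis : List (List Int)) : List (Int × Int) → List (Int × Int) × List (List Int)
  | [] => ([], vis)
  | p :: l =>
    if 0 ≤ p.1 ∧ p.1 < nn ∧ 0 ≤ p.2 ∧ p.2 < mm ∧ visGet vis p.1 p.2 = 0 then
      let r := nrun nn mm (setCell vis p.1 p.2 1) l
      (p :: r.1, r.2)
    else nrun nn mm vis l

lemma nrun_bound (nn mm : Int) : ∀ (l : List (Int × Int)) (vis : List (List Int)),
    zerosIn (nrun nn mm vis l).2 + (nrun nn mm vis l).1.length ≤ zerosIn vis := by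
  intro l
  induction l with
  | nil => intro vis; simp [nrun]
  | cons p l ih =>
    intro vis
    unfold nrun
    split
    · rename_i hcond
      have h1 := zerosIn_setCell vis _ _ hcond.2.2.2.2
      have h2 := ih (setCell vis p.1 p.2 1)
      simp
      omega
    · exact le_trans (ih vis) (le_refl _)

lemma foldl_stepB_nrun (nn mm : Int) : ∀ (l : List (Int × Int)) (acc : List (Int × Int))
    (vis ans : List (List Int)),
    l.foldl (stepB nn mm) (acc, vis, ans) = (acc ++ (nrun nn mm vis l).1, (nrun nn mm vis l).2, ans) := by
  intro l
  induction l with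
  | nil => intro acc vis ans; simp [nrun]
  | cons p l ih =>
    intro acc vis ans
    simp only [List.foldl_cons, nrun]
    by_cases hcond : 0 ≤ p.1 ∧ p.1 < nn ∧ 0 ≤ p.2 ∧ p.2 < mm ∧ visGet vis p.1 p.2 = 0
    · have hs : stepB nn mm (acc, vis, ans) p = (acc ++ [p], setCell vis p.1 p.2 1, ans) := by
        simp only [stepB]
        rw [if_pos hcond]
      rw [hs, ih, if_pos hcond]
      simp
    · have hs : stepB nn mm (acc, vis, ans) p = (acc, vis, ans) := by
        simp only [stepB]
        rw [if_neg hcond]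
      rw [hs, ih, if_neg hcond]

lemma cellB_nrun (nn mm k : Int) (acc : List (Int × Int)) (vis ans : List (List Int)) (rc : Int × Int) :
    cellB nn mm k (acc, vis, ans) rc =
      (acc ++ (nrun nn mm vis (nbrs rc)).1, (nrun nn mm vis (nbrs rc)).2, setCell ans rc.1 rc.2 k) := by
  unfold cellB nbrs
  exact foldl_stepB_nrun nn mm _ acc vis (setCell ans rc.1 rc.2 k)

lemma foldA_nrun (nn mm r c s : Int) (q : List (Int × Int × Int)) (vis : List (List Int)) :
    (List.range 4).foldl (stepA nn mm r c s) (q, vis) =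
      (q ++ ((nrun nn mm vis (nbrs (r, c))).1).map (triAt (s + 1)), (nrun nn mm vis (nbrs (r, c))).2) := by
  have hr4 : List.range 4 = [0, 1, 2, 3] := rfl
  have h1 : ∀ x : Int, 1 + x = x + 1 := fun x => by ring
  rw [hr4]
  simp only [List.foldl_cons, List.foldl_nil, stepA, nbrs, nrun, List.getD_cons_zero,
    List.getD_cons_succ, neg_add_eq_sub, zero_add, h1]
  split_ifs <;> simp [List.append_assoc, triAt]

-- B's loop, continued from the middle of a level: remaining frontier F, next-level cells N so far
def contB (nn mm : Int) (F N : List (Int × Int)) (k : Int) (vis ans : List (List Int)) : List (List Int) :=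
  loopB nn mm (F.foldl (cellB nn mm k) (N, vis, ans)).1 (k + 1)
    (F.foldl (cellB nn mm k) (N, vis, ans)).2.1 (F.foldl (cellB nn mm k) (N, vis, ans)).2.2

lemma loopA_nil (nn mm : Int) (vis ans : List (List Int)) : loopA nn mm [] vis ans = ans := by
  rw [loopA]

lemma loopA_cons (nn mm r c s : Int) (rest : List (Int × Int × Int)) (vis ans : List (List Int)) :
    loopA nn mm ((r, c, s) :: rest) vis ans =
      loopA nn mm ((List.range 4).foldl (stepA nn mm r c s) (rest, vis)).1
        ((List.range 4).foldl (stepA nn mm r c s) (rest, vis)).2 (setCell ans r c s) := by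
  rw [loopA]

lemma loopB_nil (nn mm k : Int) (vis ans : List (List Int)) : loopB nn mm [] k vis ans = ans := by
  rw [loopB]

lemma loopB_cons (nn mm k : Int) (p : Int × Int) (F : List (Int × Int)) (vis ans : List (List Int)) :
    loopB nn mm (p :: F) k vis ans =
      loopB nn mm ((p :: F).foldl (cellB nn mm k) ([], vis, ans)).1 (k + 1)
        ((p :: F).foldl (cellB nn mm k) ([], vis, ans)).2.1
        ((p :: F).foldl (cellB nn mm k) ([], vis, ans)).2.2 := by
  rw [loopB]

-- the simulation: A's queue is always (remaining level-k frontier) ++ (level-(k+1) cells so far)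
lemma simulate (nn mm : Int) : ∀ (μ : Nat) (F N : List (Int × Int)) (k : Int)
    (vis ans : List (List Int)), 2 * zerosIn vis + F.length + N.length ≤ μ →
    loopA nn mm (F.map (triAt k) ++ N.map (triAt (k + 1))) vis ans = contB nn mm F N k vis ans := by
  intro μ
  induction μ with
  | zero =>
    intro F N k vis ans h
    have hF : F = [] := List.eq_nil_of_length_eq_zero (by omega)
    have hN : N = [] := List.eq_nil_of_length_eq_zero (by omega)
    subst hF; subst hN
    simp only [List.map_nil, List.nil_append, loopA_nil]
    unfold contB
    simp only [List.foldl_nil, loopB_nil]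
  | succ μ ih =>
    intro F N k vis ans h
    match F with
    | [] =>
      match N with
      | [] =>
        simp only [List.map_nil, List.nil_append, loopA_nil]
        unfold contB
        simp only [List.foldl_nil, loopB_nil]
      | p :: N' =>
        have hb := nrun_bound nn mm (nbrs p) vis
        simp only [List.map_nil, List.nil_append, List.map_cons]
        rw [show triAt (k + 1) p = (p.1, p.2, k + 1) from rfl, loopA_cons, foldA_nrun]
        have hih := ih N' (nrun nn mm vis (nbrs p)).1 (k + 1) (nrun nn mm vis (nbrs p)).2
          (setCell ans p.1 p.2 (k + 1)) (by simp only [List.length_cons] at h; omega)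
        rw [hih]
        unfold contB
        simp only [List.foldl_nil]
        rw [loopB_cons]
        simp only [List.foldl_cons]
        rw [cellB_nrun]
        simp only [List.nil_append]
    | p :: F' =>
      have hb := nrun_bound nn mm (nbrs p) vis
      simp only [List.map_cons, List.cons_append]
      rw [show triAt k p = (p.1, p.2, k) from rfl, loopA_cons, foldA_nrun]
      rw [List.append_assoc, ← List.map_append]
      have hih := ih F' (N ++ (nrun nn mm vis (nbrs p)).1) k (nrun nn mm vis (nbrs p)).2
        (setCell ans p.1 p.2 k)
        (by simp only [List.length_cons, List.length_append] at h ⊢; omega)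
      rw [hih]
      unfold contB
      simp only [List.foldl_cons]
      rw [cellB_nrun]

lemma set_getD_self (l : List (List Int)) (n : Nat) (hn : n < l.length) :
    l.set n (l.getD n []) = l := by
  apply List.ext_getElem (by simp)
  intro i h1 h2
  rw [List.getElem_set]
  split
  · rename_i he
    subst he
    rw [List.getD_eq_getElem _ _ hn]
  · rfl

-- one row of A's source-collecting init loop
lemma inner_eq (grid : List (List Int)) (i m : Nat) : ∀ (m' : Nat), m' ≤ m →
    ∀ (q : List (Int × Int × Int)) (vis : List (List Int)), i < vis.length →
    (List.range m').foldl
        (fun (st : List (Int × Int × Int) × List (List Int)) (j : Nat) =>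
          if gridGet grid (i : Int) (j : Int) = 1 then
            (st.1 ++ [((i : Int), (j : Int), (0 : Int))], setCell st.2 (i : Int) (j : Int) 1)
          else st) (q, vis.set i (List.replicate m (0 : Int)))
      = (q ++ ((List.range m').filter (fun (j : Nat) => gridGet grid (i : Int) (j : Int) = 1)).map
            (fun (j : Nat) => ((i : Int), (j : Int), (0 : Int))),
         vis.set i ((List.range m').map (fun (j : Nat) => if gridGet grid (i : Int) (j : Int) = 1 then (1 : Int) else 0) ++
            List.replicate (m - m') (0 : Int))) := by
  intro m'
  induction m' with
  | zero => intro _ q vis _; simp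
  | succ m' ih =>
    intro hm q vis hi
    rw [List.range_succ, List.foldl_append, ih (by omega) q vis hi]
    simp only [List.foldl_cons, List.foldl_nil]
    have hlen : ((List.range m').map (fun (j : Nat) => if gridGet grid (i : Int) (j : Int) = 1 then (1 : Int) else 0)).length = m' := by simp
    have hsplit : m - m' = (m - (m' + 1)) + 1 := by omega
    by_cases hg : gridGet grid i m' = 1
    · rw [if_pos hg]
      have hset : setCell (vis.set i ((List.range m').map (fun (j : Nat) => if gridGet grid (i : Int) (j : Int) = 1 then (1 : Int) else 0) ++ List.replicate (m - m') (0 : Int))) (i : Int) (m' : Int) 1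
          = vis.set i ((List.range (m' + 1)).map (fun (j : Nat) => if gridGet grid (i : Int) (j : Int) = 1 then (1 : Int) else 0) ++ List.replicate (m - (m' + 1)) (0 : Int)) := by
        unfold setCell
        rw [Int.toNat_natCast, Int.toNat_natCast, List.set_set]
        congr 1
        have hget : (vis.set i ((List.range m').map (fun (j : Nat) => if gridGet grid (i : Int) (j : Int) = 1 then (1 : Int) else 0) ++ List.replicate (m - m') (0 : Int))).getD i []
            = (List.range m').map (fun (j : Nat) => if gridGet grid (i : Int) (j : Int) = 1 then (1 : Int) else 0) ++ List.replicate (m - m') (0 : Int) := by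
          rw [List.getD_eq_getElem _ _ (by simpa using hi)]
          simp
        rw [hget, hsplit, List.replicate_succ]
        rw [List.set_append_right _ _ (by omega)]
        rw [hlen, Nat.sub_self]
        rw [List.range_succ, List.map_append, List.append_assoc]
        simp [hg]
      rw [hset]
      rw [List.range_succ, List.filter_append, List.map_append, List.append_assoc]
      simp [hg]
    · rw [if_neg hg]
      rw [hsplit, List.replicate_succ]
      simp [List.filter_append, List.map_append, hg]

-- the whole init double loop of A: row-major sources (as level-0 triples) and the 0/1 vis grid
lemma init_eq (grid : List (List Int)) (n m : Nat) :
    (List.range n).foldl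
        (fun (st : List (Int × Int × Int) × List (List Int)) (i : Nat) =>
          (List.range m).foldl
            (fun (st : List (Int × Int × Int) × List (List Int)) (j : Nat) =>
              if gridGet grid (i : Int) (j : Int) = 1 then
                (st.1 ++ [((i : Int), (j : Int), (0 : Int))], setCell st.2 (i : Int) (j : Int) 1)
              else st) st) ([], (List.range n).map (fun _ => List.replicate m (0 : Int)))
      = ((srcList grid n m).map (triAt 0),
         (List.range n).map (fun (i : Nat) =>
            (List.range m).map (fun (j : Nat) => if gridGet grid (i : Int) (j : Int) = 1 then (1 : Int) else 0))) := by
  have key : ∀ (i' : Nat), i' ≤ n →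
      (List.range i').foldl
        (fun (st : List (Int × Int × Int) × List (List Int)) (i : Nat) =>
          (List.range m).foldl
            (fun (st : List (Int × Int × Int) × List (List Int)) (j : Nat) =>
              if gridGet grid (i : Int) (j : Int) = 1 then
                (st.1 ++ [((i : Int), (j : Int), (0 : Int))], setCell st.2 (i : Int) (j : Int) 1)
              else st) st) ([], (List.range n).map (fun _ => List.replicate m (0 : Int)))
      = ((List.range i').flatMap (fun (i : Nat) =>
            ((List.range m).filter (fun (j : Nat) => gridGet grid (i : Int) (j : Int) = 1)).map
              (fun (j : Nat) => ((i : Int), (j : Int), (0 : Int)))),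
         (List.range n).map (fun (i : Nat) =>
            if i < i' then (List.range m).map (fun (j : Nat) => if gridGet grid (i : Int) (j : Int) = 1 then (1 : Int) else 0)
            else List.replicate m (0 : Int))) := by
    intro i'
    induction i' with
    | zero => simp
    | succ i' ih =>
      intro hi'
      rw [List.range_succ, List.foldl_append, ih (by omega)]
      simp only [List.foldl_cons, List.foldl_nil]
      have hVlen : i' < ((List.range n).map (fun (i : Nat) =>
          if i < i' then (List.range m).map (fun (j : Nat) => if gridGet grid (i : Int) (j : Int) = 1 then (1 : Int) else 0)
          else List.replicate m (0 : Int))).length := by simpa using (by omega : i' < n)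
      have hVrow : ((List.range n).map (fun (i : Nat) =>
          if i < i' then (List.range m).map (fun (j : Nat) => if gridGet grid (i : Int) (j : Int) = 1 then (1 : Int) else 0)
          else List.replicate m (0 : Int))).set i' (List.replicate m (0 : Int))
          = (List.range n).map (fun (i : Nat) =>
          if i < i' then (List.range m).map (fun (j : Nat) => if gridGet grid (i : Int) (j : Int) = 1 then (1 : Int) else 0)
          else List.replicate m (0 : Int)) := by
        have := set_getD_self _ i' hVlen
        rw [List.getD_eq_getElem _ _ hVlen] at this
        simpa [List.getElem_map, List.getElem_range] using this
      rw [← hVrow, inner_eq grid i' m m (le_refl m) _ _ hVlen]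
      rw [Nat.sub_self, List.replicate_zero, List.append_nil]
      simp only [Prod.mk.injEq]
      constructor
      · rw [List.flatMap_append]
        simp
      · apply List.ext_getElem (by simp)
        intro t h1 h2
        simp only [List.getElem_set, List.getElem_map, List.getElem_range]
        simp only [List.length_map, List.length_range] at h1 h2
        by_cases ht : i' = t
        · subst ht
          simp
        · rw [if_neg ht]
          by_cases hlt : t < i'
          · rw [if_pos hlt, if_pos (by omega)]
          · rw [if_neg hlt, if_neg (by omega)]
  have := key n (le_refl n)
  rw [this]
  simp only [Prod.mk.injEq]
  constructor
  · rw [srcList, List.map_flatMap]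
    simp only [List.map_map]
    rfl
  · apply List.map_congr_left
    intro i hi
    rw [if_pos (List.mem_range.mp hi)]

-- ---------- Manhattan-distance characterisation ----------

-- in-bounds predicate for cells
def inb (n m : Nat) (p : Int × Int) : Prop :=
  0 ≤ p.1 ∧ p.1 < (n : Int) ∧ 0 ≤ p.2 ∧ p.2 < (m : Int)

-- the canonical n×m grid sampling a function
def canon (n m : Nat) (f : Int × Int → Int) : List (List Int) :=
  (List.range n).map (fun (i : Nat) => (List.range m).map (fun (j : Nat) => f ((i : Int), (j : Int))))

-- minimum Manhattan distance to the source list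
def TD (L : List (Int × Int)) (p : Int × Int) : Int := ((L.map (manh p)).min?).getD 0

lemma canon_congr (n m : Nat) (f g : Int × Int → Int)
    (h : ∀ i j : Nat, i < n → j < m → f ((i : Int), (j : Int)) = g ((i : Int), (j : Int))) :
    canon n m f = canon n m g := by
  unfold canon
  apply List.map_congr_left
  intro i hi
  apply List.map_congr_left
  intro j hj
  exact h i j (List.mem_range.mp hi) (List.mem_range.mp hj)

lemma inb_decomp (n m : Nat) (p : Int × Int) (h : inb n m p) :
    ∃ a b : Nat, a < n ∧ b < m ∧ p = ((a : Int), (b : Int)) := by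
  obtain ⟨h1, h2, h3, h4⟩ := h
  refine ⟨p.1.toNat, p.2.toNat, by omega, by omega, ?_⟩
  have e1 : ((p.1.toNat : Int)) = p.1 := Int.toNat_of_nonneg h1
  have e2 : ((p.2.toNat : Int)) = p.2 := Int.toNat_of_nonneg h3
  exact Prod.ext (by simp [e1]) (by simp [e2])

lemma visGet_canon (n m : Nat) (f : Int × Int → Int) (a b : Nat) (ha : a < n) (hb : b < m) :
    visGet (canon n m f) (a : Int) (b : Int) = f ((a : Int), (b : Int)) := by
  unfold visGet canon
  rw [Int.toNat_natCast, Int.toNat_natCast]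
  simp [List.getD_eq_getElem?_getD, ha, hb]

lemma setCell_canon (n m : Nat) (f : Int × Int → Int) (a b : Nat) (v : Int) (ha : a < n) (_hb : b < m) :
    setCell (canon n m f) (a : Int) (b : Int) v
      = canon n m (fun q => if q = ((a : Int), (b : Int)) then v else f q) := by
  unfold setCell canon
  rw [Int.toNat_natCast, Int.toNat_natCast]
  have hrow : ((List.range n).map (fun (i : Nat) => (List.range m).map (fun (j : Nat) => f ((i : Int), (j : Int))))).getD a []
      = (List.range m).map (fun (j : Nat) => f ((a : Int), (j : Int))) := by
    simp [List.getD_eq_getElem?_getD, ha]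
  rw [hrow]
  apply List.ext_getElem (by simp)
  intro i h1 h2
  simp only [List.length_map, List.length_range, List.length_set] at h1 h2
  simp only [List.getElem_set, List.getElem_map, List.getElem_range]
  by_cases hia : a = i
  · subst hia
    rw [if_pos rfl]
    apply List.ext_getElem (by simp)
    intro j h3 h4
    simp only [List.length_map, List.length_range, List.length_set] at h3 h4
    simp only [List.getElem_set, List.getElem_map, List.getElem_range]
    by_cases hjb : b = j
    · subst hjb
      simp
    · rw [if_neg hjb, if_neg (by simp [Prod.ext_iff]; omega)]
  · rw [if_neg hia]
    apply List.map_congr_left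
    intro j _
    rw [if_neg (by simp [Prod.ext_iff]; omega)]

-- ---------- properties of manh and TD ----------

lemma manh_nonneg (p q : Int × Int) : 0 ≤ manh p q := by
  unfold manh; positivity

lemma manh_self (p : Int × Int) : manh p p = 0 := by simp [manh]

lemma manh_eq_zero (p q : Int × Int) (h : manh p q = 0) : p = q := by
  unfold manh at h
  have h1 := abs_nonneg (p.1 - q.1)
  have h2 := abs_nonneg (p.2 - q.2)
  have e1 : p.1 - q.1 = 0 := by
    have : |p.1 - q.1| = 0 := by omega
    exact abs_eq_zero.mp this
  have e2 : p.2 - q.2 = 0 := by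
    have : |p.2 - q.2| = 0 := by omega
    exact abs_eq_zero.mp this
  exact Prod.ext (by omega) (by omega)

lemma manh_triangle (p q r : Int × Int) : manh p r ≤ manh p q + manh q r := by
  unfold manh
  have h1 := abs_sub_le p.1 q.1 r.1
  have h2 := abs_sub_le p.2 q.2 r.2
  omega

lemma TD_min?_eq (L : List (Int × Int)) (p : Int × Int) (hL : L ≠ []) :
    (L.map (manh p)).min? = some (TD L p) := by
  cases h : (L.map (manh p)).min? with
  | none =>
    rw [List.min?_eq_none_iff] at h
    exact absurd (List.map_eq_nil_iff.mp h) hL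
  | some a => simp [TD, h]

lemma TD_le (L : List (Int × Int)) (p s : Int × Int) (hs : s ∈ L) : TD L p ≤ manh p s := by
  have hL : L ≠ [] := by rintro rfl; simp at hs
  have h := TD_min?_eq L p hL
  rw [List.min?_eq_some_iff] at h
  exact h.2 _ (List.mem_map_of_mem hs)

lemma TD_exists (L : List (Int × Int)) (p : Int × Int) (hL : L ≠ []) :
    ∃ s ∈ L, TD L p = manh p s := by
  have h := TD_min?_eq L p hL
  rw [List.min?_eq_some_iff] at h
  obtain ⟨s, hs, he⟩ := List.mem_map.mp h.1
  exact ⟨s, hs, he.symm⟩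

lemma TD_nonneg (L : List (Int × Int)) (p : Int × Int) : 0 ≤ TD L p := by
  by_cases hL : L = []
  · subst hL; simp [TD]
  · obtain ⟨s, _, he⟩ := TD_exists L p hL
    rw [he]
    exact manh_nonneg p s

lemma TD_zero_iff (L : List (Int × Int)) (p : Int × Int) (hL : L ≠ []) :
    TD L p = 0 ↔ p ∈ L := by
  constructor
  · intro h
    obtain ⟨s, hs, he⟩ := TD_exists L p hL
    have : p = s := manh_eq_zero p s (by omega)
    subst this; exact hs
  · intro h
    have h1 := TD_le L p p h
    have h2 := TD_nonneg L p
    rw [manh_self] at h1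
    omega

lemma TD_lipschitz (L : List (Int × Int)) (p q : Int × Int) (hL : L ≠ []) :
    TD L p ≤ TD L q + manh p q := by
  obtain ⟨s, hs, he⟩ := TD_exists L q hL
  have h1 := TD_le L p s hs
  have h2 := manh_triangle p q s
  omega

-- adjacency: the four neighbours are exactly the cells at Manhattan distance 1
lemma nbrs_adj (w r : Int × Int) (h : r ∈ nbrs w) : manh r w = 1 := by
  simp only [nbrs, List.mem_cons, List.not_mem_nil, or_false] at h
  rcases h with h | h | h | h <;> subst h <;> simp [manh]

lemma adj_mem_nbrs (w r : Int × Int) (h : manh r w = 1) : r ∈ nbrs w := by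
  unfold manh at h
  simp only [nbrs, List.mem_cons, List.not_mem_nil, or_false, Prod.ext_iff]
  rcases abs_cases (r.1 - w.1) with ⟨e1, _⟩ | ⟨e1, _⟩ <;>
    rcases abs_cases (r.2 - w.2) with ⟨e2, _⟩ | ⟨e2, _⟩ <;> omega

lemma abs_succ_lt (a b : Int) (h : a < b) : |a + 1 - b| = |a - b| - 1 := by
  rw [abs_of_nonpos (by omega), abs_of_nonpos (by omega)]; omega

lemma abs_pred_gt (a b : Int) (h : b < a) : |a - 1 - b| = |a - b| - 1 := by
  rw [abs_of_nonneg (by omega), abs_of_nonneg (by omega)]; omega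

-- descent: a cell at positive distance has an in-bounds neighbour one closer
lemma TD_descent (n m : Nat) (L : List (Int × Int)) (p : Int × Int) (hL : L ≠ [])
    (hLin : ∀ s ∈ L, inb n m s) (hp : inb n m p) (hpos : 0 < TD L p) :
    ∃ r, inb n m r ∧ manh p r = 1 ∧ TD L r = TD L p - 1 := by
  obtain ⟨s, hs, he⟩ := TD_exists L p hL
  have hsin := hLin s hs
  obtain ⟨hp1, hp2, hp3, hp4⟩ := hp
  obtain ⟨hs1, hs2, hs3, hs4⟩ := hsin
  have hps : p ≠ s := by
    intro h; subst h; rw [manh_self] at he; omega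
  have key : ∃ r, inb n m r ∧ manh p r = 1 ∧ manh r s = manh p s - 1 := by
    by_cases h1 : p.1 < s.1
    · refine ⟨(p.1 + 1, p.2), ⟨by simp; omega, by simp; omega, by simpa using hp3, by simpa using hp4⟩, ?_, ?_⟩
      · simp [manh]
      · simp only [manh]
        rw [abs_succ_lt p.1 s.1 h1]
        omega
    · by_cases h2 : s.1 < p.1
      · refine ⟨(p.1 - 1, p.2), ⟨by simp; omega, by simp; omega, by simpa using hp3, by simpa using hp4⟩, ?_, ?_⟩
        · simp [manh]
        · simp only [manh]
          rw [abs_pred_gt p.1 s.1 h2]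
          omega
      · have he1 : p.1 = s.1 := by omega
        by_cases h3 : p.2 < s.2
        · refine ⟨(p.1, p.2 + 1), ⟨by simpa using hp1, by simpa using hp2, by simp; omega, by simp; omega⟩, ?_, ?_⟩
          · simp [manh]
          · simp only [manh]
            rw [abs_succ_lt p.2 s.2 h3]
            omega
        · have h4 : s.2 < p.2 := by
            rcases lt_trichotomy p.2 s.2 with h | h | h
            · exact absurd h h3
            · exact absurd (Prod.ext he1 h) hps
            · exact h
          refine ⟨(p.1, p.2 - 1), ⟨by simpa using hp1, by simpa using hp2, by simp; omega, by simp; omega⟩, ?_, ?_⟩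
          · simp [manh]
          · simp only [manh]
            rw [abs_pred_gt p.2 s.2 h4]
            omega
  obtain ⟨r, hrin, hpr, hrs⟩ := key
  have h1 : TD L r ≤ manh r s := TD_le L r s hs
  have h2 : TD L p ≤ TD L r + manh p r := TD_lipschitz L p r hL
  exact ⟨r, hrin, hpr, by omega⟩

-- no cell at level k ⇒ every cell is below k
lemma TD_no_gap (n m : Nat) (L : List (Int × Int)) (k : Int) (hL : L ≠ [])
    (hLin : ∀ s ∈ L, inb n m s) (hk : 0 ≤ k)
    (hnone : ∀ p, inb n m p → TD L p ≠ k) :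
    ∀ p, inb n m p → TD L p < k := by
  have aux : ∀ d : Nat, ∀ p, inb n m p → TD L p ≠ k + (d : Int) := by
    intro d
    induction d with
    | zero => intro p hp; simpa using hnone p hp
    | succ d ih =>
      intro p hp hT
      have hpos : 0 < TD L p := by push_cast at hT; omega
      obtain ⟨r, hrin, _, hTr⟩ := TD_descent n m L p hL hLin hp hpos
      exact ih r hrin (by push_cast at hT ⊢; omega)
  intro p hp
  by_contra h
  have h0 := TD_nonneg L p
  have : TD L p = k + ((TD L p - k).toNat : Int) := by
    rw [Int.toNat_of_nonneg (by omega)]; omega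
  exact aux (TD L p - k).toNat p hp this

-- ---------- cell enumeration ----------

def allCells (n m : Nat) : List (Int × Int) :=
  (List.range n).flatMap (fun (i : Nat) => (List.range m).map (fun (j : Nat) => ((i : Int), (j : Int))))

lemma mem_allCells (n m : Nat) (p : Int × Int) : p ∈ allCells n m ↔ inb n m p := by
  unfold allCells
  simp only [List.mem_flatMap, List.mem_map, List.mem_range]
  constructor
  · rintro ⟨i, hi, j, hj, rfl⟩
    exact ⟨by simp, by simpa using hi, by simp, by simpa using hj⟩
  · intro h
    obtain ⟨a, b, ha, hb, rfl⟩ := inb_decomp n m p h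
    exact ⟨a, ha, b, hb, rfl⟩

lemma nodup_pairs (n : Nat) (g : Nat → List Nat) (hg : ∀ i, (g i).Nodup) :
    ((List.range n).flatMap (fun (i : Nat) => (g i).map (fun (j : Nat) => ((i : Int), (j : Int))))).Nodup := by
  induction n with
  | zero => simp
  | succ n ih =>
    rw [List.range_succ, List.flatMap_append]
    simp only [List.flatMap_cons, List.flatMap_nil, List.append_nil]
    apply List.Nodup.append ih
    · exact (hg n).map (fun a b h => by simpa using (Prod.ext_iff.mp h).2)
    · intro p hp hq
      simp only [List.mem_flatMap, List.mem_map, List.mem_range] at hp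
      simp only [List.mem_map] at hq
      obtain ⟨i, hi, j, _, rfl⟩ := hp
      obtain ⟨j', _, he⟩ := hq
      have := (Prod.ext_iff.mp he).1
      simp at this
      omega

lemma nodup_srcList (grid : List (List Int)) (n m : Nat) : (srcList grid n m).Nodup := by
  exact nodup_pairs n _ (fun i => (List.nodup_range).filter _)

lemma mem_srcList (grid : List (List Int)) (n m : Nat) (p : Int × Int) :
    p ∈ srcList grid n m ↔ inb n m p ∧ gridGet grid p.1 p.2 = 1 := by
  unfold srcList
  simp only [List.mem_flatMap, List.mem_map, List.mem_filter, List.mem_range, decide_eq_true_eq]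
  constructor
  · rintro ⟨i, hi, j, ⟨hj, hg⟩, rfl⟩
    exact ⟨⟨by simp, by simpa using hi, by simp, by simpa using hj⟩, hg⟩
  · rintro ⟨h, hg⟩
    obtain ⟨a, b, ha, hb, rfl⟩ := inb_decomp n m p h
    exact ⟨a, ha, b, ⟨hb, hg⟩, rfl⟩

-- ---------- the BFS invariant functions ----------

-- vis during level k: 1 exactly on cells already enqueued (distance ≤ k, or in the partial next frontier)
def vf (L : List (Int × Int)) (k : Int) (N : List (Int × Int)) (q : Int × Int) : Int :=
  if TD L q ≤ k ∨ q ∈ N then 1 else 0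

-- ans during level k: distances already written (below k, plus the processed prefix P of the frontier)
def af (L : List (Int × Int)) (k : Int) (P : List (Int × Int)) (q : Int × Int) : Int :=
  if TD L q < k then TD L q else if q ∈ P then k else 0

lemma vf_set (n m : Nat) (L : List (Int × Int)) (k : Int) (N : List (Int × Int)) (r : Int × Int)
    (hr : inb n m r) (hrv : TD L r ≤ k ∨ r ∈ N → False) :
    setCell (canon n m (vf L k N)) r.1 r.2 1 = canon n m (vf L k (N ++ [r])) := by
  obtain ⟨a, b, ha, hb, rfl⟩ := inb_decomp n m r hr
  rw [setCell_canon n m _ a b 1 ha hb]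
  apply canon_congr
  intro i j _ _
  unfold vf
  by_cases he : ((i : Int), (j : Int)) = ((a : Int), (b : Int))
  · rw [if_pos he, he]
    rw [if_pos (by simp)]
  · rw [if_neg he]
    have : (((i : Int), (j : Int)) ∈ N ++ [((a : Int), (b : Int))]) ↔ (((i : Int), (j : Int)) ∈ N) := by
      simp [he]
    simp only [this]

lemma af_set (n m : Nat) (L : List (Int × Int)) (k : Int) (P : List (Int × Int)) (w : Int × Int)
    (hw : inb n m w) (hTw : TD L w = k) :
    setCell (canon n m (af L k P)) w.1 w.2 k = canon n m (af L k (P ++ [w])) := by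
  obtain ⟨a, b, ha, hb, rfl⟩ := inb_decomp n m w hw
  rw [setCell_canon n m _ a b k ha hb]
  apply canon_congr
  intro i j _ _
  unfold af
  by_cases he : ((i : Int), (j : Int)) = ((a : Int), (b : Int))
  · rw [if_pos he, he, if_neg (by omega), if_pos (by simp)]
  · rw [if_neg he]
    have : (((i : Int), (j : Int)) ∈ P ++ [((a : Int), (b : Int))]) ↔ (((i : Int), (j : Int)) ∈ P) := by
      simp [he]
    simp only [this]

-- ---------- the per-level fold ----------

lemma nbrs_fold (n m : Nat) (L : List (Int × Int)) (k : Int) (hL : L ≠ [])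
    (w : Int × Int) (hTw : TD L w = k) :
    ∀ (l : List (Int × Int)) (N : List (Int × Int)) (ans : List (List Int)),
    (∀ r ∈ l, manh r w = 1) → N.Nodup → (∀ u ∈ N, inb n m u ∧ TD L u = k + 1) →
    ∃ N', l.foldl (stepB (n : Int) (m : Int)) (N, canon n m (vf L k N), ans)
        = (N', canon n m (vf L k N'), ans)
      ∧ N'.Nodup ∧ (∀ u ∈ N', inb n m u ∧ TD L u = k + 1)
      ∧ (∀ u ∈ N, u ∈ N') ∧ (∀ r ∈ l, inb n m r → TD L r = k + 1 → r ∈ N') := by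
  intro l
  induction l with
  | nil =>
    intro N ans _ hNd hNel
    exact ⟨N, by simp, hNd, hNel, fun u hu => hu, by simp⟩
  | cons r l ih =>
    intro N ans hadj hNd hNel
    have hadjr : manh r w = 1 := hadj r (List.mem_cons_self)
    by_cases hinb : inb n m r
    · have hvg : visGet (canon n m (vf L k N)) r.1 r.2 = vf L k N r := by
        obtain ⟨a, b, ha, hb, rfl⟩ := inb_decomp n m r hinb
        exact visGet_canon n m _ a b ha hb
      by_cases hcase : TD L r ≤ k ∨ r ∈ N
      · have hs : stepB (n : Int) (m : Int) (N, canon n m (vf L k N), ans) r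
            = (N, canon n m (vf L k N), ans) := by
          simp only [stepB]
          rw [if_neg]
          intro hc
          have := hc.2.2.2.2
          rw [hvg] at this
          unfold vf at this
          rw [if_pos hcase] at this
          norm_num at this
        rw [List.foldl_cons, hs]
        obtain ⟨N', heq, h1, h2, h3, h4⟩ := ih N ans (fun x hx => hadj x (List.mem_cons_of_mem _ hx)) hNd hNel
        refine ⟨N', heq, h1, h2, h3, ?_⟩
        intro x hx hxin hxT
        rcases List.mem_cons.mp hx with rfl | hx'
        · rcases hcase with hc | hc
          · omega
          · exact h3 _ hc
        · exact h4 x hx' hxin hxT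
      · have hTr : TD L r = k + 1 := by
          rw [not_or] at hcase
          have h1 := TD_lipschitz L r w hL
          rw [hTw] at h1
          have := hcase.1
          omega
        have hs : stepB (n : Int) (m : Int) (N, canon n m (vf L k N), ans) r
            = (N ++ [r], canon n m (vf L k (N ++ [r])), ans) := by
          simp only [stepB]
          rw [if_pos]
          · rw [vf_set n m L k N r hinb (fun h => hcase h)]
          · obtain ⟨i1, i2, i3, i4⟩ := hinb
            refine ⟨i1, i2, i3, i4, ?_⟩
            rw [hvg]
            unfold vf
            rw [if_neg hcase]
        rw [List.foldl_cons, hs]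
        have hNd' : (N ++ [r]).Nodup := by
          refine hNd.append (List.nodup_singleton _) ?_
          intro x hx hx'
          rw [List.mem_singleton] at hx'
          subst hx'
          exact hcase (Or.inr hx)
        have hNel' : ∀ u ∈ N ++ [r], inb n m u ∧ TD L u = k + 1 := by
          intro u hu
          rcases List.mem_append.mp hu with hu | hu
          · exact hNel u hu
          · rw [List.mem_singleton] at hu
            subst hu
            exact ⟨hinb, hTr⟩
        obtain ⟨N', heq, h1, h2, h3, h4⟩ := ih (N ++ [r]) ans (fun x hx => hadj x (List.mem_cons_of_mem _ hx)) hNd' hNel'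
        refine ⟨N', heq, h1, h2, fun u hu => h3 u (List.mem_append_left _ hu), ?_⟩
        intro x hx hxin hxT
        rcases List.mem_cons.mp hx with rfl | hx'
        · exact h3 _ (List.mem_append_right _ (List.mem_singleton_self _))
        · exact h4 x hx' hxin hxT
    · have hs : stepB (n : Int) (m : Int) (N, canon n m (vf L k N), ans) r
          = (N, canon n m (vf L k N), ans) := by
        simp only [stepB]
        rw [if_neg]
        intro hc
        exact hinb ⟨hc.1, hc.2.1, hc.2.2.1, hc.2.2.2.1⟩
      rw [List.foldl_cons, hs]
      obtain ⟨N', heq, h1, h2, h3, h4⟩ := ih N ans (fun x hx => hadj x (List.mem_cons_of_mem _ hx)) hNd hNel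
      refine ⟨N', heq, h1, h2, h3, ?_⟩
      intro x hx hxin hxT
      rcases List.mem_cons.mp hx with rfl | hx'
      · exact absurd hxin hinb
      · exact h4 x hx' hxin hxT

lemma frontier_fold (n m : Nat) (L : List (Int × Int)) (k : Int) (hL : L ≠ []) :
    ∀ (R P N : List (Int × Int)),
    (∀ p ∈ R, inb n m p ∧ TD L p = k) → R.Nodup →
    (∀ p ∈ R, p ∉ P) →
    N.Nodup → (∀ u ∈ N, inb n m u ∧ TD L u = k + 1) →
    (∀ u, inb n m u → TD L u = k + 1 → (u ∈ N ∨ ∃ w ∈ R, manh u w = 1)) →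
    ∃ N', R.foldl (cellB (n : Int) (m : Int) k) (N, canon n m (vf L k N), canon n m (af L k P))
        = (N', canon n m (vf L k N'), canon n m (af L k (P ++ R)))
      ∧ N'.Nodup ∧ (∀ u ∈ N', inb n m u ∧ TD L u = k + 1)
      ∧ (∀ u, inb n m u → TD L u = k + 1 → u ∈ N') := by
  intro R
  induction R with
  | nil =>
    intro P N _ _ _ hNd hNel hcov
    refine ⟨N, by simp, hNd, hNel, ?_⟩
    intro u hu hT
    rcases hcov u hu hT with h | ⟨w, hw, _⟩
    · exact h
    · exact absurd hw (List.not_mem_nil)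
  | cons w R' ih =>
    intro P N hR hRnd hPR hNd hNel hcov
    have hw := hR w (List.mem_cons_self)
    have hcell : cellB (n : Int) (m : Int) k (N, canon n m (vf L k N), canon n m (af L k P)) w
        = (nbrs w).foldl (stepB (n : Int) (m : Int))
            (N, canon n m (vf L k N), setCell (canon n m (af L k P)) w.1 w.2 k) := rfl
    rw [List.foldl_cons, hcell, af_set n m L k P w hw.1 hw.2]
    obtain ⟨N1, heq1, hNd1, hNel1, hmono1, hget1⟩ :=
      nbrs_fold n m L k hL w hw.2 (nbrs w) N (canon n m (af L k (P ++ [w])))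
        (fun r hr => nbrs_adj w r hr) hNd hNel
    rw [heq1]
    obtain ⟨N', heq2, hNd', hNel', hcov'⟩ := ih (P ++ [w]) N1
      (fun p hp => hR p (List.mem_cons_of_mem _ hp))
      (List.Nodup.of_cons hRnd)
      (by
        intro p hp
        rw [List.mem_append, List.mem_singleton]
        push Not
        refine ⟨hPR p (List.mem_cons_of_mem _ hp), ?_⟩
        intro he
        subst he
        exact (List.nodup_cons.mp hRnd).1 hp)
      hNd1 hNel1
      (by
        intro u hu hT
        rcases hcov u hu hT with h | ⟨w', hw', hadj'⟩
        · exact Or.inl (hmono1 u h)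
        · rcases List.mem_cons.mp hw' with rfl | hw''
          · exact Or.inl (hget1 u (adj_mem_nbrs w' u hadj') hu hT)
          · exact Or.inr ⟨w', hw'', hadj'⟩)
    rw [heq2]
    refine ⟨N', ?_, hNd', hNel', hcov'⟩
    rw [List.append_assoc, List.singleton_append]

-- ---------- counting measure ----------

lemma countP_split (α : Type) (l : List α) (p q : α → Bool) :
    l.countP p = l.countP (fun a => p a && q a) + l.countP (fun a => p a && !q a) := by
  induction l with
  | nil => simp
  | cons a l ih =>
    simp only [List.countP_cons, ih]
    cases hp : p a <;> cases hq : q a <;> simp <;> omega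

lemma level_base (n m : Nat) (L : List (Int × Int)) (k : Int) (hL : L ≠ [])
    (hLin : ∀ s ∈ L, inb n m s) (hk : 0 ≤ k)
    (hnone : ∀ p, inb n m p → TD L p ≠ k) :
    canon n m (af L k []) = canon n m (TD L) := by
  apply canon_congr
  intro i j hi hj
  have hinb : inb n m ((i : Int), (j : Int)) :=
    ⟨by simp, by simpa using hi, by simp, by simpa using hj⟩
  have := TD_no_gap n m L k hL hLin hk hnone _ hinb
  unfold af
  rw [if_pos this]

-- ---------- the level loop computes TD ----------

lemma level_correct (n m : Nat) (L : List (Int × Int)) (hL : L ≠ [])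
    (hLin : ∀ s ∈ L, inb n m s) :
    ∀ (μ : Nat) (k : Int) (F : List (Int × Int)), 0 ≤ k →
    ((allCells n m).countP (fun p => decide (k ≤ TD L p))) ≤ μ →
    F.Nodup → (∀ p, p ∈ F ↔ (inb n m p ∧ TD L p = k)) →
    loopB (n : Int) (m : Int) F k (canon n m (vf L k [])) (canon n m (af L k []))
      = canon n m (TD L) := by
  intro μ
  induction μ with
  | zero =>
    intro k F hk hμ hFnd hF
    match F with
    | [] =>
      rw [loopB_nil]
      exact level_base n m L k hL hLin hk (fun p hp hT => by
        have := (hF p).2 ⟨hp, hT⟩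
        exact absurd this (List.not_mem_nil))
    | p :: F' =>
      exfalso
      have hp := (hF p).1 (List.mem_cons_self)
      have hpos : 0 < (allCells n m).countP (fun p => decide (k ≤ TD L p)) :=
        List.countP_pos_iff.2 ⟨p, (mem_allCells n m p).2 hp.1, by simp [hp.2]⟩
      omega
  | succ μ ih =>
    intro k F hk hμ hFnd hF
    match F with
    | [] =>
      rw [loopB_nil]
      exact level_base n m L k hL hLin hk (fun p hp hT => by
        have := (hF p).2 ⟨hp, hT⟩
        exact absurd this (List.not_mem_nil))
    | p :: F' =>
      rw [loopB_cons]
      obtain ⟨N', heq, hNd', hNel', hcov'⟩ := frontier_fold n m L k hL (p :: F') [] []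
        (fun q hq => (hF q).1 hq) hFnd (by simp) (by simp) (by simp)
        (by
          intro u hu hT
          have hpos : 0 < TD L u := by omega
          obtain ⟨r, hrin, hpr, hTr⟩ := TD_descent n m L u hL hLin hu hpos
          exact Or.inr ⟨r, (hF r).2 ⟨hrin, by omega⟩, hpr⟩)
      rw [List.nil_append] at heq
      rw [heq]
      have hv : canon n m (vf L k N') = canon n m (vf L (k + 1) ([] : List (Int × Int))) := by
        apply canon_congr
        intro i j hi hj
        have hinb : inb n m ((i : Int), (j : Int)) :=
          ⟨by simp, by simpa using hi, by simp, by simpa using hj⟩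
        unfold vf
        have hiff : (TD L ((i : Int), (j : Int)) ≤ k ∨ ((i : Int), (j : Int)) ∈ N')
            ↔ (TD L ((i : Int), (j : Int)) ≤ k + 1 ∨ ((i : Int), (j : Int)) ∈ ([] : List (Int × Int))) := by
          constructor
          · rintro (h | h)
            · exact Or.inl (by omega)
            · exact Or.inl (by have := (hNel' _ h).2; omega)
          · rintro (h | h)
            · by_cases h2 : TD L ((i : Int), (j : Int)) ≤ k
              · exact Or.inl h2
              · exact Or.inr (hcov' _ hinb (by omega))
            · exact absurd h (List.not_mem_nil)
        rw [if_congr hiff rfl rfl]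
      have ha : canon n m (af L k (p :: F')) = canon n m (af L (k + 1) ([] : List (Int × Int))) := by
        apply canon_congr
        intro i j hi hj
        have hinb : inb n m ((i : Int), (j : Int)) :=
          ⟨by simp, by simpa using hi, by simp, by simpa using hj⟩
        unfold af
        rcases lt_trichotomy (TD L ((i : Int), (j : Int))) k with h | h | h
        · rw [if_pos h, if_pos (by omega)]
        · rw [if_neg (by omega), if_pos ((hF _).2 ⟨hinb, h⟩), if_pos (by omega), h]
        · rw [if_neg (by omega), if_neg (fun hm => by have := ((hF _).1 hm).2; omega),
            if_neg (by omega), if_neg (List.not_mem_nil)]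
      rw [hv, ha]
      apply ih (k + 1) N' (by omega) ?_ hNd'
        (fun q => ⟨fun hq => hNel' q hq, fun h => hcov' q h.1 h.2⟩)
      have hsplit := countP_split _ (allCells n m)
        (fun p => decide (k ≤ TD L p)) (fun p => decide (TD L p ≤ k))
      have he1 : (allCells n m).countP (fun a => decide (k ≤ TD L a) && !decide (TD L a ≤ k))
          = (allCells n m).countP (fun a => decide (k + 1 ≤ TD L a)) := by
        apply List.countP_congr
        intro x _
        simp
        omega
      have hp := (hF p).1 (List.mem_cons_self)
      have hpos : 0 < (allCells n m).countP (fun a => decide (k ≤ TD L a) && decide (TD L a ≤ k)) :=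
        List.countP_pos_iff.2 ⟨p, (mem_allCells n m p).2 hp.1, by simp [hp.2]⟩
      omega

-- ---------- assembly ----------

theorem port_eq (grid : List (List Int)) : nearestCell grid = nearestCell_alt grid := by
  simp only [nearestCell, nearestCell_alt]
  rw [init_eq grid grid.length (grid.headD []).length]
  dsimp only
  by_cases hsrc : srcList grid grid.length (grid.headD []).length = []
  · rw [hsrc, if_pos rfl]
    simp only [List.map_nil, loopA_nil]
  · rw [if_neg hsrc]
    obtain ⟨p, F', hPF⟩ := List.exists_cons_of_ne_nil hsrc
    have hLin : ∀ s ∈ srcList grid grid.length (grid.headD []).length,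
        inb grid.length (grid.headD []).length s :=
      fun s hs => ((mem_srcList grid _ _ s).1 hs).1
    have hsim := simulate (grid.length : Int) ((grid.headD []).length : Int)
      (2 * zerosIn ((List.range grid.length).map (fun (i : Nat) =>
        (List.range (grid.headD []).length).map
          (fun (j : Nat) => if gridGet grid (i : Int) (j : Int) = 1 then (1 : Int) else 0))) +
        (srcList grid grid.length (grid.headD []).length).length + 0)
      (srcList grid grid.length (grid.headD []).length) [] 0
      ((List.range grid.length).map (fun (i : Nat) =>
        (List.range (grid.headD []).length).map
          (fun (j : Nat) => if gridGet grid (i : Int) (j : Int) = 1 then (1 : Int) else 0)))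
      ((List.range grid.length).map (fun _ => List.replicate (grid.headD []).length (0 : Int)))
      (by simp)
    simp only [List.map_nil, List.append_nil] at hsim
    rw [hsim]
    unfold contB
    rw [hPF, ← loopB_cons, ← hPF]
    have hvis : (List.range grid.length).map (fun (i : Nat) =>
          (List.range (grid.headD []).length).map
            (fun (j : Nat) => if gridGet grid (i : Int) (j : Int) = 1 then (1 : Int) else 0))
        = canon grid.length (grid.headD []).length
            (vf (srcList grid grid.length (grid.headD []).length) 0 []) := by
      show canon grid.length (grid.headD []).length
        (fun q => if gridGet grid q.1 q.2 = 1 then (1 : Int) else 0) = _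
      apply canon_congr
      intro i j hi hj
      have hinb : inb grid.length (grid.headD []).length ((i : Int), (j : Int)) :=
        ⟨by simp, by simpa using hi, by simp, by simpa using hj⟩
      unfold vf
      have hiff : gridGet grid (i : Int) (j : Int) = 1
          ↔ (TD (srcList grid grid.length (grid.headD []).length) ((i : Int), (j : Int)) ≤ 0
              ∨ ((i : Int), (j : Int)) ∈ ([] : List (Int × Int))) := by
        constructor
        · intro h
          exact Or.inl (le_of_eq ((TD_zero_iff _ _ hsrc).2 ((mem_srcList grid _ _ _).2 ⟨hinb, h⟩)))
        · rintro (h | h)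
          · have h0 := TD_nonneg (srcList grid grid.length (grid.headD []).length) ((i : Int), (j : Int))
            have hz : TD (srcList grid grid.length (grid.headD []).length) ((i : Int), (j : Int)) = 0 := by omega
            exact ((mem_srcList grid _ _ _).1 ((TD_zero_iff _ _ hsrc).1 hz)).2
          · exact absurd h (List.not_mem_nil)
      rw [if_congr hiff rfl rfl]
    have hans : (List.range grid.length).map (fun _ => List.replicate (grid.headD []).length (0 : Int))
        = canon grid.length (grid.headD []).length
            (af (srcList grid grid.length (grid.headD []).length) 0 []) := by
      have h0 : (List.range grid.length).map (fun _ => List.replicate (grid.headD []).length (0 : Int))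
          = canon grid.length (grid.headD []).length (fun _ => 0) := by
        unfold canon
        apply List.map_congr_left
        intro i _
        rw [List.map_const', List.length_range]
      rw [h0]
      apply canon_congr
      intro i j _ _
      unfold af
      rw [if_neg (by have := TD_nonneg (srcList grid grid.length (grid.headD []).length) ((i : Int), (j : Int)); omega),
        if_neg (List.not_mem_nil)]
    rw [hvis, hans]
    rw [level_correct grid.length (grid.headD []).length
      (srcList grid grid.length (grid.headD []).length) hsrc hLin
      ((allCells grid.length (grid.headD []).length).countP
        (fun q => decide ((0 : Int) ≤ TD (srcList grid grid.length (grid.headD []).length) q)))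
      0 (srcList grid grid.length (grid.headD []).length) (le_refl 0) (le_refl _)
      (nodup_srcList grid _ _)
      (by
        intro q
        constructor
        · intro hq
          exact ⟨hLin q hq, (TD_zero_iff _ _ hsrc).2 hq⟩
        · intro h
          exact (TD_zero_iff _ _ hsrc).1 h.2)]
    rfl

-- ===== VERDICT (by name: the statement is the Claim_ definition above) =====
theorem nearestCell_spec : Claim_equal_nearestCell := by
  intro grid _ _
  unfold Spec_nearestCell
  exact port_eq grid
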